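-- pv_equiv track=rewrite | github.com/Merubokkusu/Discord-S.C.U.M | discum/guild/permissions.py | calculateOverwrites
-- ===== SOURCE A (Python) =====
-- class PERMS:
-- 	'''
-- 	https://discord.com/developers/docs/topics/permissions#permissions-bitwise-permission-flags
-- 	'''
-- 	# Name                      Value           Description
-- 	CREATE_INSTANT_INVITE   =   1 << 0 #        Allows creation of instant invites
-- 	KICK_MEMBERS            =   1 << 1 #        Allows kicking members
-- 	BAN_MEMBERS             =   1 << 2 #        Allows banning members
-- 	ADMINISTRATOR           =   1 << 3 #        Allows all permissions and bypasses channel permission overwrites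
-- 	MANAGE_CHANNELS         =   1 << 4 #        Allows management and editing of channels
-- 	MANAGE_GUILD            =   1 << 5 #        Allows management and editing of the guild
-- 	ADD_REACTIONS           =   1 << 6 #        Allows for the addition of reactions to messages
-- 	VIEW_AUDIT_LOG          =   1 << 7 #        Allows for viewing of audit logs
-- 	PRIORITY_SPEAKER        =   1 << 8 #        Allows for using priority speaker in a voice channel
-- 	STREAM                  =   1 << 9 #        Allows the user to go live
-- 	VIEW_CHANNEL            =   1 << 10 #       Allows guild members to view a channel, which includes reading messages in text channels
-- 	SEND_MESSAGES           =   1 << 11 #       Allows for sending messages in a channel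
-- 	SEND_TTS_MESSAGES       =   1 << 12 #       Allows for sending of /tts messages
-- 	MANAGE_MESSAGES         =   1 << 13 #       Allows for deletion of other users messages
-- 	EMBED_LINKS             =   1 << 14 #       Links sent by users with this permission will be auto-embedded
-- 	ATTACH_FILES            =   1 << 15 #       Allows for uploading images and files
-- 	READ_MESSAGE_HISTORY    =   1 << 16 #       Allows for reading of message history
-- 	MENTION_EVERYONE        =   1 << 17 #       Allows for using the @everyone tag to notify all users in a channel, and the @here tag to notify all online users in a channel
-- 	USE_EXTERNAL_EMOJIS     =   1 << 18 #       Allows the usage of custom emojis from other servers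
-- 	VIEW_GUILD_INSIGHTS     =   1 << 19 #       Allows for viewing guild insights
-- 	CONNECT                 =   1 << 20 #       Allows for joining of a voice channel
-- 	SPEAK                   =   1 << 21 #       Allows for speaking in a voice channel
-- 	MUTE_MEMBERS            =   1 << 22 #       Allows for muting members in a voice channel
-- 	DEAFEN_MEMBERS          =   1 << 23 #       Allows for deafening of members in a voice channel
-- 	MOVE_MEMBERS            =   1 << 24 #       Allows for moving of members between voice channels
-- 	USE_VAD                 =   1 << 25 #       Allows for using voice-activity-detection in a voice channel
-- 	CHANGE_NICKNAME         =   1 << 26 #       Allows for modification of own nickname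
-- 	MANAGE_NICKNAMES        =   1 << 27 #       Allows for modification of other users nicknames
-- 	MANAGE_ROLES            =   1 << 28 #       Allows management and editing of roles
-- 	MANAGE_WEBHOOKS         =   1 << 29 #       Allows management and editing of webhooks
-- 	MANAGE_EMOJIS           =   1 << 30 #       Allows management and editing of emojis
-- 	USE_SLASH_COMMANDS      =   1 << 31 #       Allows members to use slash commands in text channels
-- 	REQUEST_TO_SPEAK        =   1 << 32 #       Allows for requesting to speak in stage channels.
-- 	#??                     =   1 << 33 #       ??
-- 	MANAGE_THREADS          =   1 << 34 #       Allows for deleting and archiving threads, and viewing all private threads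
-- 	USE_PUBLIC_THREADS      =   1 << 35 #       Allows for creating and participating in threads
-- 	USE_PRIVATE_THREADS     =   1 << 36 #       Allows for creating and participating in private threads
-- 	ALL                     =   128849018879 #  all the perms
--
-- def calculateOverwrites(memberID, guildID, basePermissions, channelOverwrites, memberRoles):
-- 	# ADMINISTRATOR overrides any potential permission overwrites, so there is nothing to do here.
-- 	if basePermissions & PERMS.ADMINISTRATOR == PERMS.ADMINISTRATOR:
-- 		return PERMS.ALL
--
-- 	permissions = basePermissions
-- 	channelEveryoneOverwrites = next((i for i in channelOverwrites if i["id"]==guildID), False) #https://stackoverflow.com/a/8653568/14776493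
-- 	if channelEveryoneOverwrites:
-- 		permissions &= ~int(channelEveryoneOverwrites["deny"])
-- 		permissions |= int(channelEveryoneOverwrites["allow"])
--
-- 	# Apply role specific overwrites.
-- 	allow = 0
-- 	deny = 0
-- 	for memberRoleID in memberRoles: #for the pertinent roles
-- 		overwriteRole = next((i for i in channelOverwrites if i["id"]==memberRoleID), False) #get the corresponding channel overrides
-- 		if overwriteRole:
-- 			allow |= int(overwriteRole["allow"])
-- 			deny |= int(overwriteRole["deny"])
--
-- 	permissions &= ~deny
-- 	permissions |= allow
--
-- 	# Apply member specific overwrite if it exist.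
-- 	overwriteMember = next((i for i in channelOverwrites if i["id"]==memberID), False)
-- 	if overwriteMember:
-- 		permissions &= ~int(overwriteMember["deny"])
-- 		permissions |= int(overwriteMember["allow"])
--
-- 	return permissions
-- ===== SOURCE B (Python) =====
-- class PERMS:
--     ADMINISTRATOR = 1 << 3
--     ALL = 128849018879
--
--
-- def calculateOverwrites(memberID, guildID, basePermissions, channelOverwrites, memberRoles):
--     # ADMINISTRATOR bypasses every overwrite.
--     if basePermissions & PERMS.ADMINISTRATOR == PERMS.ADMINISTRATOR:
--         return PERMS.ALL
--
--     # ONE pass over channelOverwrites (instead of one scan per query): bucket the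
--     # first overwrite of each id into the @everyone slot, the OR-accumulated role
--     # slots, and the member slot.  Entries without an "id" key are skipped.
--     roleSet = set(memberRoles)
--     seen = set()
--     everyone = None
--     member = None
--     roleAllow = 0
--     roleDeny = 0
--     for overwrite in channelOverwrites:
--         oid = overwrite.get("id")
--         if oid is None or oid in seen:
--             continue
--         seen.add(oid)
--         if oid == guildID:
--             everyone = (int(overwrite["allow"]), int(overwrite["deny"]))
--         if oid in roleSet:
--             roleAllow |= int(overwrite["allow"])
--             roleDeny |= int(overwrite["deny"])
--         if oid == memberID:
--             member = (int(overwrite["allow"]), int(overwrite["deny"]))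
--
--     permissions = basePermissions
--     if everyone is not None:
--         allow, deny = everyone
--         permissions = (permissions & ~deny) | allow
--     permissions = (permissions & ~roleDeny) | roleAllow
--     if member is not None:
--         allow, deny = member
--         permissions = (permissions & ~deny) | allow
--     return permissions
-- ===== Notes on version B (the rewrite author's own statement) =====
-- stated objective: alternative
-- what changed: A runs a fresh linear next(...) scan of channelOverwrites for the @everyone overwrite, for each member role and for the member overwrite; B inverts the traversal: it iterates over channelOverwrites exactly once, bucketing the first overwrite of each id into an @everyone slot, OR-accumulated role allow/deny masks, and a member slot, then applies the three phases in A's order.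
import Mathlib
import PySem

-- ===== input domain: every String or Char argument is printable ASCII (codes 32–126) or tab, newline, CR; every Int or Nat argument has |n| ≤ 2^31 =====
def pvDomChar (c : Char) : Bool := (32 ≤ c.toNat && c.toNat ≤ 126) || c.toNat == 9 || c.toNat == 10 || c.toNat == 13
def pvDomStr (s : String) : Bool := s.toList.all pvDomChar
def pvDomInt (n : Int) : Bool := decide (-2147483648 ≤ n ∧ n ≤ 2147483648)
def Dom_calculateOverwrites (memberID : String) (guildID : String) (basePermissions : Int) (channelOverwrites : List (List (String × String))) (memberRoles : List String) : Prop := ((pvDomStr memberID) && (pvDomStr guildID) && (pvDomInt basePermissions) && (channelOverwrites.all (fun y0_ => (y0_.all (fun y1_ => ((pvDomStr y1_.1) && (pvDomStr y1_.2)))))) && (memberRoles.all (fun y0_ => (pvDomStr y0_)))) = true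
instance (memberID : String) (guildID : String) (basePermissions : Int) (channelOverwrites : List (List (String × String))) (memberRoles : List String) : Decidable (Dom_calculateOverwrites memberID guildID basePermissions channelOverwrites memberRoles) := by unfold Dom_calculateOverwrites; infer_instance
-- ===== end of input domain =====

-- B inverts the traversal: one pass over channelOverwrites bucketing the first
-- overwrite of each id into @everyone / OR-accumulated role masks / member slots,
-- instead of A's per-query linear scans; objective: alternative.

-- shared primitives: a Python dict[str,str] is an association list
-- dget? d k = d.get(k) (first match, per the association-list convention)
def dget? (d : List (String × String)) (k : String) : Option String :=
  (d.find? (fun p => p.1 == k)).map (·.2)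

-- pvParse d k = int(d[k]); the defaults are unreachable inside Pre_ (key present, value parses)
def pvParse (d : List (String × String)) (k : String) : Int :=
  (PySem.Int.ofStr? ((dget? d k).getD "")).getD 0

-- i["id"] == k (an entry without "id" never matches; A raising there is outside Pre_)
def pvM (k : String) (d : List (String × String)) : Bool := dget? d "id" == some k

-- ===== PORT A =====
-- next((i for i in channelOverwrites if i["id"]==k), False)
def pvFindOv (ov : List (List (String × String))) (k : String) : Option (List (String × String)) :=
  ov.find? (pvM k)

def calculateOverwrites (memberID : String) (guildID : String) (basePermissions : Int) (channelOverwrites : List (List (String × String))) (memberRoles : List String) : Int :=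
  if PySem.Int.band basePermissions 8 = 8 then 128849018879
  else
    let permissions := basePermissions
    -- if channelEveryoneOverwrites: (an empty dict is falsy, like False)
    let permissions :=
      match pvFindOv channelOverwrites guildID with
      | some d => if d.isEmpty then permissions
                  else PySem.Int.bor (PySem.Int.band permissions (Int.not (pvParse d "deny"))) (pvParse d "allow")
      | none => permissions
    let ad := memberRoles.foldl (fun (ad : Int × Int) r =>
      match pvFindOv channelOverwrites r with
      | some d => if d.isEmpty then ad
                  else (PySem.Int.bor ad.1 (pvParse d "allow"), PySem.Int.bor ad.2 (pvParse d "deny"))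
      | none => ad) (0, 0)
    let permissions := PySem.Int.bor (PySem.Int.band permissions (Int.not ad.2)) ad.1
    match pvFindOv channelOverwrites memberID with
    | some d => if d.isEmpty then permissions
                else PySem.Int.bor (PySem.Int.band permissions (Int.not (pvParse d "deny"))) (pvParse d "allow")
    | none => permissions

-- ===== PORT B =====
-- the four bucket slots: (everyone, roleAllow, roleDeny, member)
-- the slot updates performed for a first-seen id oid (the body of B's loop after the seen-guard)
def pvUpd (memberID : String) (guildID : String) (roleSet : PySem.Set String)
    (q : Option (Int × Int) × Int × Int × Option (Int × Int)) (oid : String) (d : List (String × String)) :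
    Option (Int × Int) × Int × Int × Option (Int × Int) :=
  ((if oid == guildID then some (pvParse d "allow", pvParse d "deny") else q.1),
   (if PySem.Set.contains roleSet oid then PySem.Int.bor q.2.1 (pvParse d "allow") else q.2.1),
   (if PySem.Set.contains roleSet oid then PySem.Int.bor q.2.2.1 (pvParse d "deny") else q.2.2.1),
   (if oid == memberID then some (pvParse d "allow", pvParse d "deny") else q.2.2.2))

-- one iteration of B's loop: oid = overwrite.get("id"); skip if None or seen; else bucket
def pvBStep (memberID : String) (guildID : String) (roleSet : PySem.Set String)
    (st : PySem.Set String × (Option (Int × Int) × Int × Int × Option (Int × Int))) (d : List (String × String)) :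
    PySem.Set String × (Option (Int × Int) × Int × Int × Option (Int × Int)) :=
  match dget? d "id" with
  | none => st
  | some oid =>
    if PySem.Set.contains st.1 oid then st
    else (PySem.Set.add st.1 oid, pvUpd memberID guildID roleSet st.2 oid d)

def calculateOverwrites_alt (memberID : String) (guildID : String) (basePermissions : Int) (channelOverwrites : List (List (String × String))) (memberRoles : List String) : Int :=
  if PySem.Int.band basePermissions 8 = 8 then 128849018879
  else
    let roleSet : PySem.Set String := PySem.Set.ofList memberRoles
    let st := channelOverwrites.foldl (pvBStep memberID guildID roleSet)
      (PySem.Set.empty, (none, 0, 0, none))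
    let permissions := basePermissions
    let permissions :=
      match st.2.1 with
      | some ad => PySem.Int.bor (PySem.Int.band permissions (Int.not ad.2)) ad.1
      | none => permissions
    let permissions := PySem.Int.bor (PySem.Int.band permissions (Int.not st.2.2.2.1)) st.2.2.1
    match st.2.2.2.2 with
    | some ad => PySem.Int.bor (PySem.Int.band permissions (Int.not ad.2)) ad.1
    | none => permissions

-- ===== PRECONDITION & SPEC =====
-- int(d[k]) succeeds: the key is present and its value parses
def pvParseOk (d : List (String × String)) (k : String) : Bool :=
  ((dget? d k).bind PySem.Int.ofStr?).isSome

-- A's scan next((i for i in ov if i["id"]==k), False) returns without raising: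
-- every entry the scan visits before its match carries an "id" key, and the match
-- (if any) has parsable "allow" and "deny" values
def pvScanOk (ov : List (List (String × String))) (k : String) : Bool :=
  (ov.takeWhile (fun d => !(pvM k d))).all (fun d => (dget? d "id").isSome)
  && (match ov.find? (pvM k) with
      | none => true
      | some d => pvParseOk d "allow" && pvParseOk d "deny")

-- Pre_ holds exactly where Python A returns: either the ADMINISTRATOR short-circuit,
-- or every scan A performs (for guildID, each member role, and memberID) completes
-- without a KeyError (missing "id"/"allow"/"deny") or ValueError (unparsable int()).
def Pre_calculateOverwrites (memberID : String) (guildID : String) (basePermissions : Int) (channelOverwrites : List (List (String × String))) (memberRoles : List String) : Prop :=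
  PySem.Int.band basePermissions 8 = 8 ∨
  (pvScanOk channelOverwrites guildID
    && memberRoles.all (pvScanOk channelOverwrites)
    && pvScanOk channelOverwrites memberID) = true

instance (memberID : String) (guildID : String) (basePermissions : Int) (channelOverwrites : List (List (String × String))) (memberRoles : List String) : Decidable (Pre_calculateOverwrites memberID guildID basePermissions channelOverwrites memberRoles) := by unfold Pre_calculateOverwrites; infer_instance

def pvWitness_calculateOverwrites : String × String × Int × (List (List (String × String))) × List String :=
  ("m", "g", 1024, [[("id", "g"), ("allow", "2048"), ("deny", "1024")], [("id", "r"), ("allow", "4"), ("deny", "0")]], ["r"])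

def Spec_calculateOverwrites (memberID : String) (guildID : String) (basePermissions : Int) (channelOverwrites : List (List (String × String))) (memberRoles : List String) (out : Int) : Prop := out = calculateOverwrites_alt memberID guildID basePermissions channelOverwrites memberRoles
instance (memberID : String) (guildID : String) (basePermissions : Int) (channelOverwrites : List (List (String × String))) (memberRoles : List String) (out : Int) : Decidable (Spec_calculateOverwrites memberID guildID basePermissions channelOverwrites memberRoles out) := by unfold Spec_calculateOverwrites; infer_instance

-- ===== CLAIM =====
def Claim_equal_calculateOverwrites : Prop := ∀ (memberID : String) (guildID : String) (basePermissions : Int) (channelOverwrites : List (List (String × String))) (memberRoles : List String), Dom_calculateOverwrites memberID guildID basePermissions channelOverwrites memberRoles → Pre_calculateOverwrites memberID guildID basePermissions channelOverwrites memberRoles → Spec_calculateOverwrites memberID guildID basePermissions channelOverwrites memberRoles (calculateOverwrites memberID guildID basePermissions channelOverwrites memberRoles)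

-- ===== LEMMAS AND PROOFS =====

-- ---- bitwise groundwork: PySem.Int.bor is Int.lor, which is a commutative,
-- ---- associative, idempotent operation (needed to reorder B's OR-accumulation)

theorem pvLdiffAddAnd (n m : Nat) : Nat.ldiff n m + (n &&& m) = n := by
  induction n using Nat.binaryRec generalizing m with
  | zero => simp [Nat.ldiff]
  | bit b n ih =>
    cases m using Nat.bitCasesOn with
    | bit b' m' =>
      rw [Nat.ldiff_bit, Nat.land_bit]
      simp only [Nat.bit]
      have := ih m'
      cases b <;> cases b' <;> simp <;> omega

theorem pvSubAnd (n m : Nat) : n - (n &&& m) = Nat.ldiff n m := by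
  have := pvLdiffAddAnd n m; omega

theorem pvBorEqLor (a b : Int) : PySem.Int.bor a b = Int.lor a b := by
  cases a with
  | ofNat m =>
    cases b with
    | ofNat n => simp [PySem.Int.bor, Int.lor]
    | negSucc n =>
      unfold PySem.Int.bor
      rw [if_pos (by exact Int.natCast_nonneg m), if_neg (by omega : ¬ (0:Int) ≤ Int.negSucc n)]
      have h1 : (-(Int.negSucc n) - 1).toNat = n := by simp [Int.negSucc_eq]
      have h2 : (Int.ofNat m).toNat = m := rfl
      rw [h1, h2, pvSubAnd]
      simp [Int.lor, Int.negSucc_eq]; omega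
  | negSucc m =>
    cases b with
    | ofNat n =>
      unfold PySem.Int.bor
      rw [if_neg (by omega : ¬ (0:Int) ≤ Int.negSucc m), if_pos (by exact Int.natCast_nonneg n)]
      have h1 : (-(Int.negSucc m) - 1).toNat = m := by simp [Int.negSucc_eq]
      have h2 : (Int.ofNat n).toNat = n := rfl
      rw [h1, h2, pvSubAnd]
      simp [Int.lor, Int.negSucc_eq]; omega
    | negSucc n =>
      unfold PySem.Int.bor
      rw [if_neg (by omega : ¬ (0:Int) ≤ Int.negSucc m), if_neg (by omega : ¬ (0:Int) ≤ Int.negSucc n)]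
      have h1 : (-(Int.negSucc m) - 1).toNat = m := by simp [Int.negSucc_eq]
      have h2 : (-(Int.negSucc n) - 1).toNat = n := by simp [Int.negSucc_eq]
      rw [h1, h2]
      simp [Int.lor, Int.negSucc_eq]; omega

theorem pvLorAssoc (a b c : Int) : Int.lor (Int.lor a b) c = Int.lor a (Int.lor b c) := by
  cases a <;> cases b <;> cases c <;>
    simp only [Int.lor] <;> congr 1 <;>
    apply Nat.eq_of_testBit_eq <;> intro i <;>
    simp only [Nat.testBit_ldiff, Nat.testBit_or, Nat.testBit_and, Bool.not_or] <;>
    rename_i x y z <;>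
    cases x.testBit i <;> cases y.testBit i <;> cases z.testBit i <;> rfl

theorem pvLorSelf (a : Int) : Int.lor a a = a := by
  cases a <;> simp [Int.lor]

theorem pvLorComm (a b : Int) : Int.lor a b = Int.lor b a := by
  rw [← pvBorEqLor, ← pvBorEqLor]; exact PySem.Int.bor_comm a b

theorem pvLorZeroLeft (a : Int) : Int.lor 0 a = a := by
  cases a with
  | ofNat n => show Int.lor (Int.ofNat 0) (Int.ofNat n) = Int.ofNat n; simp [Int.lor]
  | negSucc n =>
    show Int.lor (Int.ofNat 0) (Int.negSucc n) = Int.negSucc n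
    simp only [Int.lor]
    congr 1
    rw [← pvSubAnd]
    simp

-- ---- folds of Int.lor depend only on the set of elements

theorem pvFoldLorZ (l : List Int) (z : Int) :
    l.foldl Int.lor z = Int.lor z (l.foldl Int.lor 0) := by
  induction l generalizing z with
  | nil => simp [pvLorComm z 0, pvLorZeroLeft]
  | cons y t ih =>
    simp only [List.foldl_cons]
    rw [ih (Int.lor z y), ih (Int.lor 0 y), pvLorZeroLeft, pvLorAssoc]

theorem pvFoldLorAbsorb (l : List Int) (z x : Int) (hx : x ∈ l) :
    Int.lor (l.foldl Int.lor z) x = l.foldl Int.lor z := by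
  induction l generalizing z with
  | nil => cases hx
  | cons y t ih =>
    simp only [List.foldl_cons]
    rcases List.mem_cons.mp hx with h | h
    · subst h
      rw [pvFoldLorZ t (Int.lor z x)]
      rw [pvLorAssoc, pvLorComm (List.foldl Int.lor 0 t) x, ← pvLorAssoc,
        pvLorAssoc z x x, pvLorSelf]
    · exact ih (Int.lor z y) h

theorem pvFoldLorSubset (l1 l2 : List Int) (z : Int) (h : ∀ x ∈ l1, x ∈ l2) :
    Int.lor (l2.foldl Int.lor z) (l1.foldl Int.lor 0) = l2.foldl Int.lor z := by
  induction l1 with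
  | nil => show Int.lor _ 0 = _; rw [pvLorComm, pvLorZeroLeft]
  | cons x t ih =>
    simp only [List.foldl_cons]
    rw [pvFoldLorZ t (Int.lor 0 x), pvLorZeroLeft, ← pvLorAssoc]
    rw [pvFoldLorAbsorb l2 z x (h x (List.mem_cons_self))]
    exact ih (fun y hy => h y (List.mem_cons_of_mem x hy))

theorem pvFoldLorSetEq (l1 l2 : List Int) (z : Int)
    (h12 : ∀ x ∈ l1, x ∈ l2) (h21 : ∀ x ∈ l2, x ∈ l1) :
    l1.foldl Int.lor z = l2.foldl Int.lor z := by
  have e1 := pvFoldLorSubset l1 l2 0 h12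
  have e2 := pvFoldLorSubset l2 l1 0 h21
  have : l1.foldl Int.lor 0 = l2.foldl Int.lor 0 := by
    rw [← e2, pvLorComm, e1]
  rw [pvFoldLorZ l1 z, pvFoldLorZ l2 z, this]

-- Bool/Prop bridges for PySem.Set membership
theorem pvNotMem {s : PySem.Set String} {x : String} (h : PySem.Set.contains s x = false) : x ∉ s :=
  fun hm => by rw [(PySem.Set.contains_iff s x).mpr hm] at h; cases h

theorem pvMemOfContains {s : PySem.Set String} {x : String} (h : PySem.Set.contains s x = true) : x ∈ s :=
  (PySem.Set.contains_iff s x).mp h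

-- ---- the first-occurrence subsequence of channelOverwrites (B's seen-set, as a spec)

def pvUniq (seen : PySem.Set String) : List (List (String × String)) → List (List (String × String))
  | [] => []
  | d :: rest =>
    match dget? d "id" with
    | none => pvUniq seen rest
    | some oid =>
      if PySem.Set.contains seen oid then pvUniq seen rest
      else d :: pvUniq (PySem.Set.add seen oid) rest

theorem pvUniqFilterMem (k : String) (ov : List (List (String × String))) :
    ∀ seen : PySem.Set String, PySem.Set.contains seen k = true →
    (pvUniq seen ov).filter (pvM k) = [] := by
  induction ov with
  | nil => intro seen _; rfl
  | cons d rest ih =>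
    intro seen hk
    cases hid : dget? d "id" with
    | none => simp only [pvUniq, hid]; exact ih seen hk
    | some oid =>
      simp only [pvUniq, hid]
      by_cases hc : PySem.Set.contains seen oid = true
      · rw [if_pos hc]; exact ih seen hk
      · rw [if_neg hc]
        have hne : (pvM k d) = false := by
          have : oid ≠ k := by
            intro h; subst h; exact hc hk
          simp [pvM, hid, this]
        rw [List.filter_cons_of_neg (by simp [hne])]
        have hk' : PySem.Set.contains (PySem.Set.add seen oid) k = true := by
          rw [PySem.Set.contains_iff]
          exact (PySem.Set.mem_add seen oid k).mpr (Or.inl (pvMemOfContains hk))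
        exact ih _ hk'

theorem pvUniqFilter (k : String) (ov : List (List (String × String))) :
    ∀ seen : PySem.Set String, PySem.Set.contains seen k = false →
    (pvUniq seen ov).filter (pvM k) = (pvFindOv ov k).toList := by
  induction ov with
  | nil => intro seen _; rfl
  | cons d rest ih =>
    intro seen hk
    cases hid : dget? d "id" with
    | none =>
      simp only [pvUniq, hid, pvFindOv]
      rw [List.find?_cons_of_neg (by simp [pvM, hid])]
      exact ih seen hk
    | some oid =>
      simp only [pvUniq, hid, pvFindOv]
      by_cases hoidk : oid = k
      · subst hoidk
        rw [if_neg (by rw [hk]; simp)]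
        have hm : pvM oid d = true := by simp [pvM, hid]
        rw [List.filter_cons_of_pos hm, List.find?_cons_of_pos hm]
        have : PySem.Set.contains (PySem.Set.add seen oid) oid = true := by
          rw [PySem.Set.contains_iff]
          exact (PySem.Set.mem_add seen oid oid).mpr (Or.inr rfl)
        rw [pvUniqFilterMem oid rest _ this]
        rfl
      · have hm : pvM k d = false := by simp [pvM, hid, hoidk]
        rw [List.find?_cons_of_neg (by simp [hm])]
        by_cases hc : PySem.Set.contains seen oid = true
        · rw [if_pos hc]; exact ih seen hk
        · rw [if_neg hc]
          rw [List.filter_cons_of_neg (by simp [hm])]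
          have hk' : PySem.Set.contains (PySem.Set.add seen oid) k = false := by
            rw [Bool.eq_false_iff]
            intro h
            rcases (PySem.Set.mem_add seen oid k).mp ((PySem.Set.contains_iff _ _).mp h) with h' | h'
            · exact pvNotMem hk h'
            · exact hoidk h'.symm
          exact ih _ hk'

-- membership in pvUniq [] characterized through A's scan
theorem pvMemUniq_find (ov : List (List (String × String))) (k : String)
    (d : List (String × String)) (hd : d ∈ pvUniq PySem.Set.empty ov) (hm : pvM k d = true) :
    pvFindOv ov k = some d := by
  have h0 : PySem.Set.contains (PySem.Set.empty : PySem.Set String) k = false := rfl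
  have := pvUniqFilter k ov PySem.Set.empty h0
  have hdin : d ∈ (pvUniq PySem.Set.empty ov).filter (pvM k) := List.mem_filter.mpr ⟨hd, hm⟩
  rw [this] at hdin
  cases hfind : pvFindOv ov k with
  | none => rw [hfind] at hdin; cases hdin
  | some d' =>
    rw [hfind] at hdin
    simp at hdin
    rw [hdin]

theorem pvFind_memUniq (ov : List (List (String × String))) (k : String)
    (d : List (String × String)) (hfind : pvFindOv ov k = some d) :
    d ∈ pvUniq PySem.Set.empty ov ∧ pvM k d = true := by
  have h0 : PySem.Set.contains (PySem.Set.empty : PySem.Set String) k = false := rfl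
  have hfl := pvUniqFilter k ov PySem.Set.empty h0
  rw [hfind] at hfl
  have : d ∈ (pvUniq PySem.Set.empty ov).filter (pvM k) := by rw [hfl]; simp
  exact List.mem_filter.mp this

-- ---- B's fold, reduced to a seen-free fold over pvUniq

def pvStep' (memberID : String) (guildID : String) (roleSet : PySem.Set String)
    (q : Option (Int × Int) × Int × Int × Option (Int × Int)) (d : List (String × String)) :
    Option (Int × Int) × Int × Int × Option (Int × Int) :=
  match dget? d "id" with
  | none => q
  | some oid => pvUpd memberID guildID roleSet q oid d

theorem pvFoldUniq (memberID guildID : String) (roleSet : PySem.Set String)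
    (ov : List (List (String × String))) :
    ∀ (seen : PySem.Set String) (q : Option (Int × Int) × Int × Int × Option (Int × Int)),
    (ov.foldl (pvBStep memberID guildID roleSet) (seen, q)).2
      = (pvUniq seen ov).foldl (pvStep' memberID guildID roleSet) q := by
  induction ov with
  | nil => intro seen q; rfl
  | cons d rest ih =>
    intro seen q
    cases hid : dget? d "id" with
    | none =>
      simp only [List.foldl_cons, pvBStep, hid, pvUniq]
      exact ih seen q
    | some oid =>
      by_cases hc : PySem.Set.contains seen oid = true
      · simp only [List.foldl_cons, pvBStep, hid, hc, if_pos, pvUniq]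
        exact ih seen q
      · simp only [List.foldl_cons, pvBStep, hid, pvUniq]
        rw [if_neg hc, if_neg hc]
        simp only [List.foldl_cons, pvStep', hid]
        exact ih _ _

-- predicates matching the slot conditions inside pvUpd
def pvRoleP (roleSet : PySem.Set String) (d : List (String × String)) : Bool :=
  match dget? d "id" with
  | none => false
  | some oid => PySem.Set.contains roleSet oid

def pvPair (d : List (String × String)) : Int × Int := (pvParse d "allow", pvParse d "deny")

-- the seen-free fold splits into four independent component folds
theorem pvStepSplit (memberID guildID : String) (roleSet : PySem.Set String)
    (l : List (List (String × String))) :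
    ∀ (ev : Option (Int × Int)) (ra rd : Int) (mb : Option (Int × Int)),
    l.foldl (pvStep' memberID guildID roleSet) (ev, ra, rd, mb)
      = (l.foldl (fun e d => if pvM guildID d then some (pvPair d) else e) ev,
         l.foldl (fun a d => if pvRoleP roleSet d then PySem.Int.bor a (pvParse d "allow") else a) ra,
         l.foldl (fun a d => if pvRoleP roleSet d then PySem.Int.bor a (pvParse d "deny") else a) rd,
         l.foldl (fun e d => if pvM memberID d then some (pvPair d) else e) mb) := by
  induction l with
  | nil => intro ev ra rd mb; rfl
  | cons d t ih =>
    intro ev ra rd mb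
    cases hid : dget? d "id" with
    | none =>
      simp only [List.foldl_cons, pvStep', hid, pvM, pvRoleP]
      rw [ih]
      simp [pvM, pvRoleP]
    | some oid =>
      simp only [List.foldl_cons, pvStep', hid, pvUpd]
      rw [ih]
      simp [pvM, pvRoleP, hid, pvPair]

-- ---- option-slot folds through the filtered list

theorem pvFoldOptNil {α β : Type} (p : α → Bool) (f : α → β) (l : List α) :
    ∀ e : Option β, l.filter p = [] →
    l.foldl (fun e d => if p d then some (f d) else e) e = e := by
  induction l with
  | nil => intro e _; rfl
  | cons d t ih =>
    intro e hf
    by_cases hp : p d = true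
    · rw [List.filter_cons_of_pos hp] at hf; cases hf
    · rw [List.filter_cons_of_neg (by simpa using hp)] at hf
      rw [List.foldl_cons, if_neg hp]
      exact ih e hf

theorem pvFoldOptSingle {α β : Type} (p : α → Bool) (f : α → β) (l : List α) :
    ∀ (e : Option β) (d0 : α), l.filter p = [d0] →
    l.foldl (fun e d => if p d then some (f d) else e) e = some (f d0) := by
  induction l with
  | nil => intro e d0 hf; cases hf
  | cons d t ih =>
    intro e d0 hf
    by_cases hp : p d = true
    · rw [List.filter_cons_of_pos hp] at hf
      injection hf with hd ht
      subst hd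
      rw [List.foldl_cons, if_pos hp]
      exact pvFoldOptNil p f t _ ht
    · rw [List.filter_cons_of_neg (by simpa using hp)] at hf
      rw [List.foldl_cons, if_neg hp]
      exact ih e d0 hf

-- ---- OR-slot folds as folds of Int.lor over filterMapped lists

theorem pvFoldIfFilterMap {α : Type} (p : α → Bool) (g : α → Int) (l : List α) :
    ∀ z : Int,
    l.foldl (fun a d => if p d then Int.lor a (g d) else a) z
      = (l.filterMap (fun d => if p d then some (g d) else none)).foldl Int.lor z := by
  induction l with
  | nil => intro z; rfl
  | cons d t ih =>
    intro z
    by_cases hp : p d = true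
    · rw [List.filterMap_cons_some (by rw [if_pos hp])]
      rw [List.foldl_cons, List.foldl_cons, if_pos hp]
      exact ih _
    · rw [List.filterMap_cons_none (by rw [if_neg hp])]
      rw [List.foldl_cons, if_neg hp]
      exact ih _

theorem pvFoldMatchFilterMap (ov : List (List (String × String))) (g : List (String × String) → Int)
    (roles : List String) : ∀ z : Int,
    roles.foldl (fun a r =>
      match pvFindOv ov r with
      | some d => Int.lor a (g d)
      | none => a) z
      = (roles.filterMap (fun r => (pvFindOv ov r).map g)).foldl Int.lor z := by
  induction roles with
  | nil => intro z; rfl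
  | cons r t ih =>
    intro z
    cases hf : pvFindOv ov r with
    | none =>
      rw [List.filterMap_cons_none (by rw [hf]; rfl)]
      simp only [List.foldl_cons, hf]
      exact ih z
    | some d =>
      rw [List.filterMap_cons_some (by rw [hf]; rfl)]
      simp only [List.foldl_cons, hf]
      exact ih _

-- the two OR-contribution lists hold the same values
theorem pvRoleMemIff (ov : List (List (String × String))) (memberRoles : List String)
    (g : List (String × String) → Int) (x : Int) :
    x ∈ (pvUniq PySem.Set.empty ov).filterMap
          (fun d => if pvRoleP (PySem.Set.ofList memberRoles) d then some (g d) else none)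
      ↔ x ∈ memberRoles.filterMap (fun r => (pvFindOv ov r).map g) := by
  simp only [List.mem_filterMap]
  constructor
  · rintro ⟨d, hd, he⟩
    by_cases hp : pvRoleP (PySem.Set.ofList memberRoles) d = true
    · rw [if_pos hp] at he
      injection he with hx
      cases hid : dget? d "id" with
      | none => simp [pvRoleP, hid] at hp
      | some oid =>
        have hcon : PySem.Set.contains (PySem.Set.ofList memberRoles) oid = true := by
          simpa [pvRoleP, hid] using hp
        have hmem : oid ∈ memberRoles := by
          exact (PySem.Set.mem_ofList memberRoles oid).mp ((PySem.Set.contains_iff _ _).mp hcon)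
        have hfind : pvFindOv ov oid = some d :=
          pvMemUniq_find ov oid d hd (by simp [pvM, hid])
        exact ⟨oid, hmem, by rw [hfind]; simp [hx]⟩
    · rw [if_neg hp] at he; cases he
  · rintro ⟨r, hr, he⟩
    cases hf : pvFindOv ov r with
    | none => rw [hf] at he; cases he
    | some d =>
      rw [hf] at he
      simp only [Option.map_some] at he
      injection he with hx
      obtain ⟨hd, hm⟩ := pvFind_memUniq ov r d hf
      refine ⟨d, hd, ?_⟩
      have hid : dget? d "id" = some r := by
        simpa [pvM] using hm
      have hcon : PySem.Set.contains (PySem.Set.ofList memberRoles) r = true := by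
        rw [PySem.Set.contains_iff]
        exact (PySem.Set.mem_ofList memberRoles r).mpr hr
      rw [if_pos (by simp [pvRoleP, hid, hr])]
      simp [hx]

-- a dict returned by a scan carries "id", hence is nonempty (truthy)
theorem pvFindOv_not_empty (ov : List (List (String × String))) (k : String) (d : List (String × String))
    (h : pvFindOv ov k = some d) : d.isEmpty = false := by
  have hp := List.find?_some h
  cases d with
  | nil => simp [pvM, dget?] at hp
  | cons p rest => rfl

-- the everyone / member slots of B equal A's scans
theorem pvOptSlot (ov : List (List (String × String))) (k : String) :
    (pvUniq PySem.Set.empty ov).foldl (fun e d => if pvM k d then some (pvPair d) else e) none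
      = (pvFindOv ov k).map pvPair := by
  have h0 : PySem.Set.contains (PySem.Set.empty : PySem.Set String) k = false := rfl
  have hfl := pvUniqFilter k ov PySem.Set.empty h0
  cases hf : pvFindOv ov k with
  | none =>
    rw [hf] at hfl
    rw [pvFoldOptNil (pvM k) pvPair _ none hfl]
    rfl
  | some d =>
    rw [hf] at hfl
    rw [pvFoldOptSingle (pvM k) pvPair _ none d hfl]
    rfl

-- the role OR slots of B equal A's role loop (for allow and for deny alike)
theorem pvOrSlot (ov : List (List (String × String))) (memberRoles : List String)
    (g : List (String × String) → Int) :
    (pvUniq PySem.Set.empty ov).foldl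
        (fun a d => if pvRoleP (PySem.Set.ofList memberRoles) d then Int.lor a (g d) else a) 0
      = memberRoles.foldl (fun a r =>
          match pvFindOv ov r with
          | some d => Int.lor a (g d)
          | none => a) 0 := by
  rw [pvFoldIfFilterMap, pvFoldMatchFilterMap]
  exact pvFoldLorSetEq _ _ 0
    (fun x hx => (pvRoleMemIff ov memberRoles g x).mp hx)
    (fun x hx => (pvRoleMemIff ov memberRoles g x).mpr hx)

-- A's role pair-fold splits into two Int folds
theorem pvPairFoldSplit (ov : List (List (String × String))) (roles : List String) :
    ∀ (a0 d0 : Int),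
    roles.foldl (fun (ad : Int × Int) r =>
      match pvFindOv ov r with
      | some d => (Int.lor ad.1 (pvParse d "allow"), Int.lor ad.2 (pvParse d "deny"))
      | none => ad) (a0, d0)
      = (roles.foldl (fun a r =>
          match pvFindOv ov r with
          | some d => Int.lor a (pvParse d "allow")
          | none => a) a0,
         roles.foldl (fun a r =>
          match pvFindOv ov r with
          | some d => Int.lor a (pvParse d "deny")
          | none => a) d0) := by
  induction roles with
  | nil => intro a0 d0; rfl
  | cons r t ih =>
    intro a0 d0
    simp only [List.foldl_cons]
    cases hf : pvFindOv ov r with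
    | none => simp; exact ih a0 d0
    | some d => simp; exact ih _ _

-- ===== VERDICT =====
theorem calculateOverwrites_spec : Claim_equal_calculateOverwrites := by
  intro memberID guildID basePermissions channelOverwrites memberRoles _hdom _hpre
  unfold Spec_calculateOverwrites
  by_cases hadm : PySem.Int.band basePermissions 8 = 8
  · simp [calculateOverwrites, calculateOverwrites_alt, hadm]
  · simp only [calculateOverwrites, calculateOverwrites_alt, if_neg hadm]
    rw [pvFoldUniq memberID guildID (PySem.Set.ofList memberRoles) channelOverwrites
      PySem.Set.empty (none, 0, 0, none)]
    rw [pvStepSplit]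
    simp only [pvBorEqLor]
    rw [pvOptSlot channelOverwrites guildID, pvOptSlot channelOverwrites memberID]
    rw [pvOrSlot channelOverwrites memberRoles (fun d => pvParse d "allow"),
        pvOrSlot channelOverwrites memberRoles (fun d => pvParse d "deny")]
    -- A side: drop the isEmpty guards, split the pair fold
    have hfun : (fun (ad : Int × Int) r =>
        match pvFindOv channelOverwrites r with
        | some d => if d.isEmpty then ad
                    else (Int.lor ad.1 (pvParse d "allow"), Int.lor ad.2 (pvParse d "deny"))
        | none => ad)
      = (fun (ad : Int × Int) r =>
        match pvFindOv channelOverwrites r with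
        | some d => (Int.lor ad.1 (pvParse d "allow"), Int.lor ad.2 (pvParse d "deny"))
        | none => ad) := by
      funext ad r
      cases hf : pvFindOv channelOverwrites r with
      | none => rfl
      | some d => simp [pvFindOv_not_empty channelOverwrites r d hf]
    rw [hfun, pvPairFoldSplit]
    cases hg : pvFindOv channelOverwrites guildID with
    | none =>
      cases hm : pvFindOv channelOverwrites memberID with
      | none => simp
      | some dm => simp [pvFindOv_not_empty channelOverwrites memberID dm hm, pvPair]
    | some dg =>
      cases hm : pvFindOv channelOverwrites memberID with
      | none => simp [pvFindOv_not_empty channelOverwrites guildID dg hg, pvPair]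
      | some dm => simp [pvFindOv_not_empty channelOverwrites guildID dg hg,
                          pvFindOv_not_empty channelOverwrites memberID dm hm, pvPair]
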